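-- pv_equiv track=rewrite | github.com/M1chaY/ML_elyte | qa_generation.py | generate_alkyls
-- ===== SOURCE A (Python) =====
-- def generate_alkyls(max_carbons):
--     """生成烷基基团"""
--     alkyls = []
--
--     # 基本直链烷基
--     for n in range(1, min(max_carbons + 1, 8)):
--         alkyls.append(("C" * n, n))
--
--     # 分支烷基
--     if max_carbons >= 3:
--         alkyls.append(("C(C)C", 3))  # 异丙基
--     if max_carbons >= 4:
--         alkyls.extend([("CC(C)C", 4), ("C(C)(C)C", 4)])  # 异丁基，叔丁基
--     if max_carbons >= 5:
--         alkyls.extend([("CC(C)CC", 5), ("CCC(C)C", 5), ("C(C)CCC", 5)])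
--
--     return alkyls
-- ===== SOURCE B (Python) =====
-- # One declarative table of (SMILES, carbon_count) in A's emission order; result is a single filter pass.
-- _ALKYL_TABLE = [
--     ("C", 1), ("CC", 2), ("CCC", 3), ("CCCC", 4), ("CCCCC", 5), ("CCCCCC", 6), ("CCCCCCC", 7),
--     ("C(C)C", 3),
--     ("CC(C)C", 4), ("C(C)(C)C", 4),
--     ("CC(C)CC", 5), ("CCC(C)C", 5), ("C(C)CCC", 5),
-- ]
--
-- def generate_alkyls(max_carbons):
--     return [(s, n) for (s, n) in _ALKYL_TABLE if n <= max_carbons]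
-- ===== Notes on version B (the rewrite author's own statement) =====
-- stated objective: simpler
-- what changed: Replaces the string-building loop and the chain of max_carbons>=k branches by one constant table of (SMILES, carbons) pairs in emission order and a single filter n <= max_carbons.
import Mathlib
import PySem

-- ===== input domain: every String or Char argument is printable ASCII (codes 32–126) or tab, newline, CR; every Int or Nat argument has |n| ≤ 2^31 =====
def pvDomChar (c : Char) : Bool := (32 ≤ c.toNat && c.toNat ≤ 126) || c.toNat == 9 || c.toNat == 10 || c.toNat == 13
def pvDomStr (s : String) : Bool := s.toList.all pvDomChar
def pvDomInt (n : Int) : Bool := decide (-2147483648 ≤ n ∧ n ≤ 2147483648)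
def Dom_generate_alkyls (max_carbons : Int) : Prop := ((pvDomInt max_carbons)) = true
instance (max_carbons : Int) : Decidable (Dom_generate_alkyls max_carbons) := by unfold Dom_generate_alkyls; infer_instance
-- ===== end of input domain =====

-- B replaces A's string-building loop and max_carbons>=k branch chain by one constant
-- table of (SMILES, carbons) pairs in A's emission order filtered once by n <= max_carbons (simpler).


-- ===== PORT A =====
def generate_alkyls (max_carbons : Int) : List (String × Int) :=
  -- alkyls = []; for n in range(1, min(max_carbons + 1, 8)): alkyls.append(("C"*n, n))
  let alkyls : List (String × Int) :=
    (PySem.List.pyRange 1 (min (max_carbons + 1) 8) 1).foldl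
      (fun acc n => acc ++ [(String.ofList (List.replicate n.toNat 'C'), n)]) []
  let alkyls := if 3 ≤ max_carbons then alkyls ++ [("C(C)C", 3)] else alkyls
  let alkyls := if 4 ≤ max_carbons then alkyls ++ [("CC(C)C", 4), ("C(C)(C)C", 4)] else alkyls
  let alkyls := if 5 ≤ max_carbons then alkyls ++ [("CC(C)CC", 5), ("CCC(C)C", 5), ("C(C)CCC", 5)] else alkyls
  alkyls

-- ===== PORT B =====
def alkylTable : List (String × Int) :=
  [("C", 1), ("CC", 2), ("CCC", 3), ("CCCC", 4), ("CCCCC", 5), ("CCCCCC", 6), ("CCCCCCC", 7),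
   ("C(C)C", 3),
   ("CC(C)C", 4), ("C(C)(C)C", 4),
   ("CC(C)CC", 5), ("CCC(C)C", 5), ("C(C)CCC", 5)]

def generate_alkyls_alt (max_carbons : Int) : List (String × Int) :=
  alkylTable.filter (fun p => p.2 ≤ max_carbons)

-- ===== PRECONDITION & SPEC =====
def Spec_generate_alkyls (max_carbons : Int) (out : List (String × Int)) : Prop := out = generate_alkyls_alt max_carbons
instance (max_carbons : Int) (out : List (String × Int)) : Decidable (Spec_generate_alkyls max_carbons out) := by unfold Spec_generate_alkyls; infer_instance

-- ===== CLAIM (what is proved, stated in full; the proofs are below) =====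
def Claim_equal_generate_alkyls : Prop := ∀ (max_carbons : Int), Dom_generate_alkyls max_carbons → Spec_generate_alkyls max_carbons (generate_alkyls max_carbons)

-- ===== LEMMAS AND PROOFS =====

-- ===== VERDICT (by name: the statement is the Claim_ definition above) =====
theorem generate_alkyls_spec : Claim_equal_generate_alkyls := by
  intro m _
  unfold Spec_generate_alkyls
  by_cases h0 : m ≤ 0
  · have hmin : min (m + 1) 8 = m + 1 := by omega
    have hnil : PySem.List.pyRange 1 (m + 1) 1 = [] :=
      PySem.List.pyRange_one_eq_nil (by omega)
    have h1 : ¬ ((1:Int) ≤ m) := by omega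
    have h2 : ¬ ((2:Int) ≤ m) := by omega
    have h3 : ¬ ((3:Int) ≤ m) := by omega
    have h4 : ¬ ((4:Int) ≤ m) := by omega
    have h5 : ¬ ((5:Int) ≤ m) := by omega
    have h6 : ¬ ((6:Int) ≤ m) := by omega
    have h7 : ¬ ((7:Int) ≤ m) := by omega
    simp [generate_alkyls, generate_alkyls_alt, alkylTable, hmin, hnil,
      h1, h2, h3, h4, h5, h6, h7, List.filter]
  · by_cases h7 : 7 ≤ m
    · have hmin : min (m + 1) 8 = 8 := by omega
      have g1 : (1:Int) ≤ m := by omega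
      have g2 : (2:Int) ≤ m := by omega
      have g3 : (3:Int) ≤ m := by omega
      have g4 : (4:Int) ≤ m := by omega
      have g5 : (5:Int) ≤ m := by omega
      have g6 : (6:Int) ≤ m := by omega
      simp [generate_alkyls, generate_alkyls_alt, alkylTable, hmin,
        g1, g2, g3, g4, g5, g6, h7, List.filter]
      decide
    · interval_cases m <;> decide
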